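-- pv_equiv track=rewrite | github.com/m-arsalaan/threat-intel-dashboard | collectors/otx_collector.py | classify_threat
-- ===== SOURCE A (Python) =====
-- def classify_threat(text):
--     """
--     Look at the pulse name and description and guess the threat category.
--     """
--
--     text = text.lower()
--
--     if any(
--         word in text
--         for word in [
--             "malware",
--             "trojan",
--             "rat",
--             "backdoor",
--             "ransomware"
--         ]
--     ):
--         return "malware"
--
--     elif any(
--         word in text
--         for word in [
--             "phishing",
--             "credential",
--             "login",
--             "fake"
--         ]
--     ):
--         return "phishing"
--
--     elif any(
--         word in text
--         for word in [
--             "scan",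
--             "brute",
--             "recon",
--             "crawler"
--         ]
--     ):
--         return "scanning"
--
--     elif any(
--         word in text
--         for word in [
--             "botnet",
--             "c2",
--             "command",
--             "control"
--         ]
--     ):
--         return "botnet"
--
--     elif any(
--         word in text
--         for word in [
--             "exploit",
--             "vulnerability",
--             "cve"
--         ]
--     ):
--         return "exploitation"
--
--     elif any(
--         word in text
--         for word in [
--             "spam",
--             "bulk"
--         ]
--     ):
--         return "spam"
--
--     else:
--         return "suspicious"
-- ===== SOURCE B (Python) =====
-- KEYWORD_RANK = {
--     "malware": 0, "trojan": 0, "rat": 0, "backdoor": 0, "ransomware": 0,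
--     "phishing": 1, "credential": 1, "login": 1, "fake": 1,
--     "scan": 2, "brute": 2, "recon": 2, "crawler": 2,
--     "botnet": 3, "c2": 3, "command": 3, "control": 3,
--     "exploit": 4, "vulnerability": 4, "cve": 4,
--     "spam": 5, "bulk": 5,
-- }
--
-- CATEGORIES = ["malware", "phishing", "scanning", "botnet", "exploitation", "spam"]
--
--
-- def classify_threat(text):
--     text = text.lower()
--     ranks = [rank for word, rank in KEYWORD_RANK.items() if word in text]
--     if not ranks:
--         return "suspicious"
--     return CATEGORIES[min(ranks)]
-- ===== Notes on version B (the rewrite author's own statement) =====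
-- stated objective: alternative
-- what changed: Replaces the six-branch if/elif early-return chain with a flat keyword-to-priority-rank dict: one pass collects the ranks of all matching keywords and the category with the minimum rank (or 'suspicious' if none matched) is returned.
import Mathlib
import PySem

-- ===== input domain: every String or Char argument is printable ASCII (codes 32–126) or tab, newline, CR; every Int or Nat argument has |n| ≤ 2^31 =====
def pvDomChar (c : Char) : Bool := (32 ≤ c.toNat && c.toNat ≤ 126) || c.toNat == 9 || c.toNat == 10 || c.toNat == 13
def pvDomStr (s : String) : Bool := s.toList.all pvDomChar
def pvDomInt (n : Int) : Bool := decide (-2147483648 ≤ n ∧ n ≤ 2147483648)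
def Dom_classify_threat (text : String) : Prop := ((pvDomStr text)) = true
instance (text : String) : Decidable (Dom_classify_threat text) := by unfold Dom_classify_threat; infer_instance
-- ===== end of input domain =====

-- B replaces A's six-branch if/elif early-return chain by a flat keyword→rank table:
-- one pass collects the ranks of all matching keywords and the minimum-rank category is
-- returned (objective: alternative, same asymptotic cost).


-- ===== PORT A =====
def classify_threat (text : String) : String :=
  let t := PySem.Str.lower text
  if ["malware", "trojan", "rat", "backdoor", "ransomware"].any (fun word => PySem.Str.isIn word t) then
    "malware"
  else if ["phishing", "credential", "login", "fake"].any (fun word => PySem.Str.isIn word t) then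
    "phishing"
  else if ["scan", "brute", "recon", "crawler"].any (fun word => PySem.Str.isIn word t) then
    "scanning"
  else if ["botnet", "c2", "command", "control"].any (fun word => PySem.Str.isIn word t) then
    "botnet"
  else if ["exploit", "vulnerability", "cve"].any (fun word => PySem.Str.isIn word t) then
    "exploitation"
  else if ["spam", "bulk"].any (fun word => PySem.Str.isIn word t) then
    "spam"
  else
    "suspicious"

-- ===== PORT B =====
-- KEYWORD_RANK: a dict literal with pairwise distinct keys = this association list
def pvKeywordRank : List (String × Int) :=
  [("malware", 0), ("trojan", 0), ("rat", 0), ("backdoor", 0), ("ransomware", 0),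
   ("phishing", 1), ("credential", 1), ("login", 1), ("fake", 1),
   ("scan", 2), ("brute", 2), ("recon", 2), ("crawler", 2),
   ("botnet", 3), ("c2", 3), ("command", 3), ("control", 3),
   ("exploit", 4), ("vulnerability", 4), ("cve", 4),
   ("spam", 5), ("bulk", 5)]

def pvCategories : List String :=
  ["malware", "phishing", "scanning", "botnet", "exploitation", "spam"]

-- ranks = [rank for word, rank in KEYWORD_RANK.items() if word in text]
def pvRanks (t : String) : List Int :=
  pvKeywordRank.filterMap (fun p => if PySem.Str.isIn p.1 t then some p.2 else none)

def classify_threat_alt (text : String) : String :=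
  let t := PySem.Str.lower text
  match PySem.List.min? (pvRanks t) (fun r => r) with
  | none => "suspicious"                     -- "if not ranks: return 'suspicious'"
  | some r => (PySem.List.pyGet? pvCategories r).getD "suspicious"
      -- CATEGORIES[min(ranks)]: the .getD default is unreachable (every rank indexes pvCategories)

-- ===== PRECONDITION & SPEC =====
def Spec_classify_threat (text : String) (out : String) : Prop := out = classify_threat_alt text
instance (text : String) (out : String) : Decidable (Spec_classify_threat text out) := by unfold Spec_classify_threat; infer_instance

-- ===== CLAIM (what is proved, stated in full; the proofs are below) =====
def Claim_equal_classify_threat : Prop := ∀ (text : String), Dom_classify_threat text → Spec_classify_threat text (classify_threat text)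

-- ===== LEMMAS AND PROOFS =====

-- B's free-standing 'if word in text then keep rank' over a constant-rank keyword group
lemma pv_group_mem (ws : List String) (i : Int) (t : String) (r : Int) :
    r ∈ (ws.map (fun w => (w, i))).filterMap (fun p => if PySem.Str.isIn p.1 t then some p.2 else none) ↔
    ws.any (fun word => PySem.Str.isIn word t) = true ∧ r = i := by
  simp only [List.filterMap_map, List.mem_filterMap, Function.comp_def,
    Option.ite_none_right_eq_some, Option.some.injEq, List.any_eq_true]
  constructor
  · rintro ⟨w, hw, hin, rfl⟩; exact ⟨⟨w, hw, hin⟩, rfl⟩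
  · rintro ⟨⟨w, hw, hin⟩, rfl⟩; exact ⟨w, hw, hin, rfl⟩

-- the flat table regrouped into A's six category keyword groups
lemma pv_kw_eq : pvKeywordRank =
    (["malware", "trojan", "rat", "backdoor", "ransomware"].map (fun w => (w, (0:Int)))) ++
    (["phishing", "credential", "login", "fake"].map (fun w => (w, (1:Int)))) ++
    (["scan", "brute", "recon", "crawler"].map (fun w => (w, (2:Int)))) ++
    (["botnet", "c2", "command", "control"].map (fun w => (w, (3:Int)))) ++
    (["exploit", "vulnerability", "cve"].map (fun w => (w, (4:Int)))) ++
    (["spam", "bulk"].map (fun w => (w, (5:Int)))) := by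
  simp [pvKeywordRank]

-- r is a collected rank iff category r has a matching keyword
lemma pv_mem_ranks (t : String) (r : Int) : r ∈ pvRanks t ↔
    ((["malware", "trojan", "rat", "backdoor", "ransomware"].any (fun word => PySem.Str.isIn word t)) = true ∧ r = 0) ∨
    ((["phishing", "credential", "login", "fake"].any (fun word => PySem.Str.isIn word t)) = true ∧ r = 1) ∨
    ((["scan", "brute", "recon", "crawler"].any (fun word => PySem.Str.isIn word t)) = true ∧ r = 2) ∨
    ((["botnet", "c2", "command", "control"].any (fun word => PySem.Str.isIn word t)) = true ∧ r = 3) ∨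
    ((["exploit", "vulnerability", "cve"].any (fun word => PySem.Str.isIn word t)) = true ∧ r = 4) ∨
    ((["spam", "bulk"].any (fun word => PySem.Str.isIn word t)) = true ∧ r = 5) := by
  rw [pvRanks, pv_kw_eq]
  simp only [List.filterMap_append, List.mem_append, pv_group_mem]
  simp only [or_assoc]

-- min of an Int list pinned by a member that is a lower bound
lemma pv_min?_eq (xs : List Int) (i : Int) (hi : i ∈ xs) (hlb : ∀ x ∈ xs, i ≤ x) :
    PySem.List.min? xs (fun r => r) = some i := by
  cases h : PySem.List.min? xs (fun r => r) with
  | none =>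
    rw [PySem.List.min?_eq_none_iff] at h
    simp [h] at hi
  | some m =>
    have hm : m ∈ xs := PySem.List.min?_mem h
    have h1 : m ≤ i := PySem.List.min?_isMin h i hi
    have h2 : i ≤ m := hlb m hm
    have : m = i := le_antisymm h1 h2
    rw [this]

-- ===== VERDICT (by name: the statement is the Claim_ definition above) =====
theorem classify_threat_spec : Claim_equal_classify_threat := by
  intro text _
  unfold Spec_classify_threat
  simp only [classify_threat, classify_threat_alt]
  set t := PySem.Str.lower text with ht
  by_cases h0 : (["malware", "trojan", "rat", "backdoor", "ransomware"].any (fun word => PySem.Str.isIn word t)) = true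
  · rw [pv_min?_eq (pvRanks t) 0 ((pv_mem_ranks t 0).mpr (Or.inl ⟨h0, rfl⟩))
      (by intro x hx
          rcases (pv_mem_ranks t x).mp hx with ⟨h, rfl⟩ | ⟨h, rfl⟩ | ⟨h, rfl⟩ | ⟨h, rfl⟩ | ⟨h, rfl⟩ | ⟨h, rfl⟩ <;> omega)]
    rw [if_pos h0]
    rfl
  · by_cases h1 : (["phishing", "credential", "login", "fake"].any (fun word => PySem.Str.isIn word t)) = true
    · rw [pv_min?_eq (pvRanks t) 1 ((pv_mem_ranks t 1).mpr (Or.inr (Or.inl ⟨h1, rfl⟩)))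
        (by intro x hx
            rcases (pv_mem_ranks t x).mp hx with ⟨h, rfl⟩ | ⟨h, rfl⟩ | ⟨h, rfl⟩ | ⟨h, rfl⟩ | ⟨h, rfl⟩ | ⟨h, rfl⟩
            · exact absurd h h0
            · omega
            · omega
            · omega
            · omega
            · omega)]
      rw [if_neg h0, if_pos h1]
      rfl
    · by_cases h2 : (["scan", "brute", "recon", "crawler"].any (fun word => PySem.Str.isIn word t)) = true
      · rw [pv_min?_eq (pvRanks t) 2 ((pv_mem_ranks t 2).mpr (Or.inr (Or.inr (Or.inl ⟨h2, rfl⟩))))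
          (by intro x hx
              rcases (pv_mem_ranks t x).mp hx with ⟨h, rfl⟩ | ⟨h, rfl⟩ | ⟨h, rfl⟩ | ⟨h, rfl⟩ | ⟨h, rfl⟩ | ⟨h, rfl⟩
              · exact absurd h h0
              · exact absurd h h1
              · omega
              · omega
              · omega
              · omega)]
        rw [if_neg h0, if_neg h1, if_pos h2]
        rfl
      · by_cases h3 : (["botnet", "c2", "command", "control"].any (fun word => PySem.Str.isIn word t)) = true
        · rw [pv_min?_eq (pvRanks t) 3 ((pv_mem_ranks t 3).mpr (Or.inr (Or.inr (Or.inr (Or.inl ⟨h3, rfl⟩)))))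
            (by intro x hx
                rcases (pv_mem_ranks t x).mp hx with ⟨h, rfl⟩ | ⟨h, rfl⟩ | ⟨h, rfl⟩ | ⟨h, rfl⟩ | ⟨h, rfl⟩ | ⟨h, rfl⟩
                · exact absurd h h0
                · exact absurd h h1
                · exact absurd h h2
                · omega
                · omega
                · omega)]
          rw [if_neg h0, if_neg h1, if_neg h2, if_pos h3]
          rfl
        · by_cases h4 : (["exploit", "vulnerability", "cve"].any (fun word => PySem.Str.isIn word t)) = true
          · rw [pv_min?_eq (pvRanks t) 4 ((pv_mem_ranks t 4).mpr (Or.inr (Or.inr (Or.inr (Or.inr (Or.inl ⟨h4, rfl⟩))))))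
              (by intro x hx
                  rcases (pv_mem_ranks t x).mp hx with ⟨h, rfl⟩ | ⟨h, rfl⟩ | ⟨h, rfl⟩ | ⟨h, rfl⟩ | ⟨h, rfl⟩ | ⟨h, rfl⟩
                  · exact absurd h h0
                  · exact absurd h h1
                  · exact absurd h h2
                  · exact absurd h h3
                  · omega
                  · omega)]
            rw [if_neg h0, if_neg h1, if_neg h2, if_neg h3, if_pos h4]
            rfl
          · by_cases h5 : (["spam", "bulk"].any (fun word => PySem.Str.isIn word t)) = true
            · rw [pv_min?_eq (pvRanks t) 5 ((pv_mem_ranks t 5).mpr (Or.inr (Or.inr (Or.inr (Or.inr (Or.inr ⟨h5, rfl⟩))))))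
                (by intro x hx
                    rcases (pv_mem_ranks t x).mp hx with ⟨h, rfl⟩ | ⟨h, rfl⟩ | ⟨h, rfl⟩ | ⟨h, rfl⟩ | ⟨h, rfl⟩ | ⟨h, rfl⟩
                    · exact absurd h h0
                    · exact absurd h h1
                    · exact absurd h h2
                    · exact absurd h h3
                    · exact absurd h h4
                    · omega)]
              rw [if_neg h0, if_neg h1, if_neg h2, if_neg h3, if_neg h4, if_pos h5]
              rfl
            · have hnone : PySem.List.min? (pvRanks t) (fun r => r) = none := by
                cases h : PySem.List.min? (pvRanks t) (fun r => r) with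
                | none => rfl
                | some m =>
                  exfalso
                  have hm := PySem.List.min?_mem h
                  rcases (pv_mem_ranks t m).mp hm with ⟨h, _⟩ | ⟨h, _⟩ | ⟨h, _⟩ | ⟨h, _⟩ | ⟨h, _⟩ | ⟨h, _⟩
                  · exact h0 h
                  · exact h1 h
                  · exact h2 h
                  · exact h3 h
                  · exact h4 h
                  · exact h5 h
              rw [hnone, if_neg h0, if_neg h1, if_neg h2, if_neg h3, if_neg h4, if_neg h5]
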